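-- pv_equiv track=rewrite | github.com/yinanwang1/LearnPython | LeetCode/LeetCode8/checkAlmostEquivalent.py | checkAlmostEquivalent
-- ===== SOURCE A (Python) =====
-- def checkAlmostEquivalent(word1: str, word2: str) -> bool:
--     from collections import Counter
--     counter1 = dict(Counter(word1))
--     counter2 = dict(Counter(word2))
--     all = set(counter1.keys()).union(set(counter2.keys()))
--     for c in all:
--         num1 = counter1.get(c) if counter1.get(c) else 0
--         num2 = counter2.get(c) if counter2.get(c) else 0
--         if abs(num2 - num1) > 3:
--             return False
--
--     return True
-- ===== SOURCE B (Python) =====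
-- def checkAlmostEquivalent(word1: str, word2: str) -> bool:
--     s1, s2 = sorted(word1), sorted(word2)
--     i, j = 0, 0
--     while i < len(s1) or j < len(s2):
--         if j >= len(s2) or (i < len(s1) and s1[i] < s2[j]):
--             c = s1[i]
--         else:
--             c = s2[j]
--         n1 = 0
--         while i < len(s1) and s1[i] == c:
--             i += 1
--             n1 += 1
--         n2 = 0
--         while j < len(s2) and s2[j] == c:
--             j += 1
--             n2 += 1
--         if abs(n1 - n2) > 3:
--             return False
--     return True
-- ===== Notes on version B (the rewrite author's own statement) =====
-- stated objective: alternative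
-- what changed: B sorts both words and merges the two sorted character sequences with two pointers, comparing run lengths of each character, instead of A's two Counter hash maps plus an explicit key-union set traversal with per-key lookups; it trades hashing for an O(n log n) sort.
import Mathlib
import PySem

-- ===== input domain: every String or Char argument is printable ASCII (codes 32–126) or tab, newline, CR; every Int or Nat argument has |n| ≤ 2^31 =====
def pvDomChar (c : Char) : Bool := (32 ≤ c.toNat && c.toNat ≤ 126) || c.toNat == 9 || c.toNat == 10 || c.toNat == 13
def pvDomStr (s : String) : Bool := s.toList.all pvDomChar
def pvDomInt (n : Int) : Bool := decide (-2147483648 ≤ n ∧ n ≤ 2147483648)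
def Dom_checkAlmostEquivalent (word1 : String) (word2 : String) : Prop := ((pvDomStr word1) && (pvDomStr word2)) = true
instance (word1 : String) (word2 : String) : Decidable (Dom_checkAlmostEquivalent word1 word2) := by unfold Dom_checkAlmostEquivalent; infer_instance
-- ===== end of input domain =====

-- B replaces A's Counter-based key-union scan by sorting both words and merging the two
-- sorted character sequences run by run with two pointers; return values are proved equal.

-- ===== PORT A =====

-- num = (g if g else 0) for g = counter.get(c) : Optional[int]
def caeNum (g : Option Int) : Int :=
  match g with
  | some v => if v ≠ 0 then v else 0
  | none => 0

-- the 'for c in all: … return False' loop of A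
def caeLoop (c1 c2 : PySem.Dict Char Int) : List Char → Bool
  | [] => true
  | c :: rest =>
    let num1 := caeNum (c1.get? c)
    let num2 := caeNum (c2.get? c)
    if |num2 - num1| > 3 then false else caeLoop c1 c2 rest

def checkAlmostEquivalent (word1 : String) (word2 : String) : Bool :=
  let counter1 := PySem.Dict.counter word1.toList
  let counter2 := PySem.Dict.counter word2.toList
  let allKeys := PySem.Set.union (PySem.Set.ofList counter1.keys) (PySem.Set.ofList counter2.keys)
  caeLoop counter1 counter2 allKeys

-- ===== PORT B =====

-- the 'c = …' choice: smaller current head (or the only available head)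
def caeMinHead : List Char → List Char → Char
  | [], [] => ' '            -- unreachable: caller guarantees one list nonempty
  | [], c :: _ => c
  | c :: _, [] => c
  | c1 :: _, c2 :: _ => if c1 < c2 then c1 else c2

-- termination measure fact for the two-pointer walk (cited by caeRuns's decreasing_by)
theorem caeDrop_lt (s1 s2 : List Char) (h : ¬(s1 = [] ∧ s2 = [])) :
    (s1.dropWhile (· == caeMinHead s1 s2)).length + (s2.dropWhile (· == caeMinHead s1 s2)).length
      < s1.length + s2.length := by
  match s1, s2 with
  | [], [] => exact absurd ⟨rfl, rfl⟩ h
  | [], b :: t2 =>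
    have hle := List.length_dropWhile_le (fun x => x == b) t2
    simp only [caeMinHead, List.dropWhile_nil, List.length_nil]
    rw [show List.dropWhile (· == b) (b :: t2) = List.dropWhile (· == b) t2 from by
      rw [List.dropWhile_cons]; simp]
    simp only [List.length_cons]
    omega
  | a :: t1, [] =>
    have hle := List.length_dropWhile_le (fun x => x == a) t1
    simp only [caeMinHead, List.dropWhile_nil, List.length_nil]
    rw [show List.dropWhile (· == a) (a :: t1) = List.dropWhile (· == a) t1 from by
      rw [List.dropWhile_cons]; simp]
    simp only [List.length_cons]
    omega
  | a :: t1, b :: t2 =>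
    by_cases hab : a < b
    · have h1 := List.length_dropWhile_le (fun x => x == a) t1
      have h2 := List.length_dropWhile_le (fun x => x == a) (b :: t2)
      simp only [caeMinHead, if_pos hab]
      rw [show List.dropWhile (· == a) (a :: t1) = List.dropWhile (· == a) t1 from by
        rw [List.dropWhile_cons]; simp]
      simp only [List.length_cons] at *
      omega
    · have h1 := List.length_dropWhile_le (fun x => x == b) (a :: t1)
      have h2 := List.length_dropWhile_le (fun x => x == b) t2
      simp only [caeMinHead, if_neg hab]
      rw [show List.dropWhile (· == b) (b :: t2) = List.dropWhile (· == b) t2 from by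
        rw [List.dropWhile_cons]; simp]
      simp only [List.length_cons] at *
      omega

-- the outer while loop of B: consume one run of the smallest pending character from each list
def caeRuns (s1 s2 : List Char) : Bool :=
  if h : s1 = [] ∧ s2 = [] then true
  else
    let c := caeMinHead s1 s2
    let n1 := (s1.takeWhile (· == c)).length
    let n2 := (s2.takeWhile (· == c)).length
    if |(n1 : Int) - (n2 : Int)| > 3 then false
    else caeRuns (s1.dropWhile (· == c)) (s2.dropWhile (· == c))
termination_by s1.length + s2.length
decreasing_by exact caeDrop_lt s1 s2 h

def checkAlmostEquivalent_alt (word1 : String) (word2 : String) : Bool :=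
  caeRuns (PySem.List.sorted word1.toList (fun x => x) false)
          (PySem.List.sorted word2.toList (fun x => x) false)

-- ===== PRECONDITION & SPEC =====
def Spec_checkAlmostEquivalent (word1 : String) (word2 : String) (out : Bool) : Prop := out = checkAlmostEquivalent_alt word1 word2
instance (word1 : String) (word2 : String) (out : Bool) : Decidable (Spec_checkAlmostEquivalent word1 word2 out) := by unfold Spec_checkAlmostEquivalent; infer_instance

-- ===== CLAIM (what is proved, stated in full; the proofs are below) =====
def Claim_equal_checkAlmostEquivalent : Prop := ∀ (word1 : String) (word2 : String), Dom_checkAlmostEquivalent word1 word2 → Spec_checkAlmostEquivalent word1 word2 (checkAlmostEquivalent word1 word2)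

-- ===== LEMMAS AND PROOFS =====

theorem caeNum_eq (d : PySem.Dict Char Int) (c : Char) : caeNum (d.get? c) = d.getD c 0 := by
  cases h : d.get? c with
  | none => simp [caeNum, PySem.Dict.getD, h]
  | some v => by_cases hv : v = 0 <;> simp [caeNum, PySem.Dict.getD, h, hv]

theorem caeLoop_eq_all (c1 c2 : PySem.Dict Char Int) (l : List Char) :
    caeLoop c1 c2 l = l.all (fun c => |caeNum (c2.get? c) - caeNum (c1.get? c)| ≤ 3) := by
  induction l with
  | nil => rfl
  | cons c rest ih =>
    simp only [caeLoop, List.all_cons, ih]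
    by_cases h : |caeNum (c2.get? c) - caeNum (c1.get? c)| > 3 <;> simp [h] <;> omega

-- on a sorted list whose every element is ≥ c, the leading run of c's is all the c's
theorem caeTake_count (s : List Char) (c : Char)
    (hs : s.Pairwise (· ≤ ·)) (hmin : ∀ x ∈ s, c ≤ x) :
    (s.takeWhile (· == c)).length = s.count c := by
  induction s with
  | nil => rfl
  | cons a t ih =>
    by_cases hac : a = c
    · subst hac
      have ht : t.Pairwise (· ≤ ·) := hs.of_cons
      have hmt : ∀ x ∈ t, a ≤ x := fun x hx => hmin x (List.mem_cons_of_mem _ hx)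
      simp [List.takeWhile_cons, List.count_cons, ih ht hmt]
    · have hca : c < a := lt_of_le_of_ne (hmin a (List.mem_cons_self)) (fun e => hac e.symm)
      have hnot : c ∉ a :: t := by
        intro hc
        rcases List.mem_cons.mp hc with rfl | hc
        · exact absurd rfl (ne_of_gt hca)
        · exact absurd (List.rel_of_pairwise_cons hs hc) (not_le.mpr hca)
      rw [List.count_eq_zero.mpr hnot, List.takeWhile_cons]
      simp [show (a == c) = false by simp [hac]]

-- counts after dropping the leading run of c's
theorem caeDrop_count (s : List Char) (c ch : Char) :
    (s.dropWhile (· == c)).count ch =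
      s.count ch - if ch = c then (s.takeWhile (· == c)).length else 0 := by
  have hsplit := List.takeWhile_append_dropWhile (p := (· == c)) (l := s)
  have hcnt : s.count ch = (s.takeWhile (· == c)).count ch + (s.dropWhile (· == c)).count ch := by
    conv_lhs => rw [← hsplit]
    exact List.count_append ..
  have htake : (s.takeWhile (· == c)).count ch =
      if ch = c then (s.takeWhile (· == c)).length else 0 := by
    by_cases h : ch = c
    · subst h
      rw [if_pos rfl, List.count_eq_length.mpr]
      intro x hx
      have hpx := List.mem_takeWhile_imp (p := (· == ch)) hx
      exact ((beq_iff_eq).mp hpx).symm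
    · rw [if_neg h, List.count_eq_zero.mpr]
      intro hmem
      exact h ((beq_iff_eq).mp (List.mem_takeWhile_imp (p := (· == c)) hmem))
  omega

theorem caeMinHead_min (s1 s2 : List Char) (h : ¬(s1 = [] ∧ s2 = []))
    (h1 : s1.Pairwise (· ≤ ·)) (h2 : s2.Pairwise (· ≤ ·)) :
    (∀ x ∈ s1, caeMinHead s1 s2 ≤ x) ∧ (∀ x ∈ s2, caeMinHead s1 s2 ≤ x) := by
  match s1, s2 with
  | [], [] => exact absurd ⟨rfl, rfl⟩ h
  | [], b :: t2 =>
    refine ⟨by simp, fun x hx => ?_⟩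
    rcases List.mem_cons.mp hx with rfl | hx
    · exact le_refl _
    · exact List.rel_of_pairwise_cons h2 hx
  | a :: t1, [] =>
    refine ⟨fun x hx => ?_, by simp⟩
    rcases List.mem_cons.mp hx with rfl | hx
    · exact le_refl _
    · exact List.rel_of_pairwise_cons h1 hx
  | a :: t1, b :: t2 =>
    have ha : ∀ x ∈ a :: t1, a ≤ x := by
      intro x hx
      rcases List.mem_cons.mp hx with rfl | hx
      · exact le_refl _
      · exact List.rel_of_pairwise_cons h1 hx
    have hb : ∀ x ∈ b :: t2, b ≤ x := by
      intro x hx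
      rcases List.mem_cons.mp hx with rfl | hx
      · exact le_refl _
      · exact List.rel_of_pairwise_cons h2 hx
    by_cases hab : a < b
    · simp only [caeMinHead, if_pos hab]
      exact ⟨ha, fun x hx => le_trans (le_of_lt hab) (hb x hx)⟩
    · simp only [caeMinHead, if_neg hab]
      exact ⟨fun x hx => le_trans (not_lt.mp hab) (ha x hx), hb⟩

theorem caeRuns_iff (n : Nat) : ∀ (s1 s2 : List Char), s1.length + s2.length ≤ n →
    s1.Pairwise (· ≤ ·) → s2.Pairwise (· ≤ ·) →
    (caeRuns s1 s2 = true ↔ ∀ ch, |(s1.count ch : Int) - (s2.count ch : Int)| ≤ 3) := by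
  induction n with
  | zero =>
    intro s1 s2 hlen _ _
    have h1 : s1 = [] := List.length_eq_zero_iff.mp (by omega)
    have h2 : s2 = [] := List.length_eq_zero_iff.mp (by omega)
    subst h1; subst h2
    rw [caeRuns]
    simp
  | succ n ih =>
    intro s1 s2 hlen h1 h2
    rw [caeRuns]
    by_cases h : s1 = [] ∧ s2 = []
    · obtain ⟨e1, e2⟩ := h; subst e1; subst e2; simp
    · rw [dif_neg h]
      set c := caeMinHead s1 s2 with hc
      obtain ⟨hm1, hm2⟩ := caeMinHead_min s1 s2 h h1 h2
      have ht1 : (s1.takeWhile (· == c)).length = s1.count c := caeTake_count s1 c h1 hm1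
      have ht2 : (s2.takeWhile (· == c)).length = s2.count c := caeTake_count s2 c h2 hm2
      have hd1 : ∀ ch, (s1.dropWhile (· == c)).count ch =
          if ch = c then 0 else s1.count ch := by
        intro ch
        rw [caeDrop_count, ht1]
        by_cases hch : ch = c
        · subst hch; simp
        · simp [hch]
      have hd2 : ∀ ch, (s2.dropWhile (· == c)).count ch =
          if ch = c then 0 else s2.count ch := by
        intro ch
        rw [caeDrop_count, ht2]
        by_cases hch : ch = c
        · subst hch; simp
        · simp [hch]
      have hsub1 : (s1.dropWhile (· == c)).Pairwise (· ≤ ·) :=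
        h1.sublist (List.dropWhile_sublist _)
      have hsub2 : (s2.dropWhile (· == c)).Pairwise (· ≤ ·) :=
        h2.sublist (List.dropWhile_sublist _)
      have hlen' : (s1.dropWhile (· == c)).length + (s2.dropWhile (· == c)).length ≤ n := by
        have := caeDrop_lt s1 s2 h
        rw [← hc] at this
        omega
      by_cases hchk : |((s1.takeWhile (· == c)).length : Int) - ((s2.takeWhile (· == c)).length : Int)| > 3
      · rw [if_pos hchk]
        simp only [Bool.false_eq_true, false_iff, not_forall]
        refine ⟨c, ?_⟩
        rw [ht1, ht2] at hchk
        omega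
      · rw [if_neg hchk, ih _ _ hlen' hsub1 hsub2]
        rw [ht1, ht2] at hchk
        constructor
        · intro hall ch
          by_cases hch : ch = c
          · subst hch; omega
          · have := hall ch
            rw [hd1 ch, hd2 ch, if_neg hch, if_neg hch] at this
            exact this
        · intro hall ch
          rw [hd1 ch, hd2 ch]
          by_cases hch : ch = c
          · simp [hch]
          · rw [if_neg hch, if_neg hch]; exact hall ch

-- A = true ↔ all per-character count differences ≤ 3
theorem caeA_iff (w1 w2 : List Char) :
    (caeLoop (PySem.Dict.counter w1) (PySem.Dict.counter w2)
        (PySem.Set.union (PySem.Set.ofList (PySem.Dict.counter w1).keys)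
          (PySem.Set.ofList (PySem.Dict.counter w2).keys)) = true) ↔
    ∀ ch, |(w1.count ch : Int) - (w2.count ch : Int)| ≤ 3 := by
  rw [caeLoop_eq_all]
  simp only [List.all_eq_true, decide_eq_true_eq]
  constructor
  · intro hall ch
    by_cases hmem : ch ∈ w1 ∨ ch ∈ w2
    · have hin : ch ∈ PySem.Set.union (PySem.Set.ofList (PySem.Dict.counter w1).keys)
          (PySem.Set.ofList (PySem.Dict.counter w2).keys) := by
        rw [PySem.Set.union, PySem.Set.mem_update]
        rcases hmem with h' | h'
        · exact Or.inl (by rw [PySem.Set.mem_ofList, PySem.Dict.keys_counter, PySem.Set.mem_ofList]; exact h')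
        · exact Or.inr (by rw [PySem.Set.mem_ofList, PySem.Dict.keys_counter, PySem.Set.mem_ofList]; exact h')
      have := hall ch hin
      rw [caeNum_eq, caeNum_eq, PySem.Dict.getD_counter, PySem.Dict.getD_counter] at this
      rw [abs_sub_comm] at this
      exact this
    · obtain ⟨hn1, hn2⟩ := not_or.mp hmem
      rw [List.count_eq_zero.mpr hn1, List.count_eq_zero.mpr hn2]
      simp
  · intro hall ch _
    rw [caeNum_eq, caeNum_eq, PySem.Dict.getD_counter, PySem.Dict.getD_counter, abs_sub_comm]
    exact hall ch

-- ===== VERDICT (by name: the statement is the Claim_ definition above) =====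
theorem checkAlmostEquivalent_spec : Claim_equal_checkAlmostEquivalent := by
  intro word1 word2 _
  show checkAlmostEquivalent word1 word2 = checkAlmostEquivalent_alt word1 word2
  unfold checkAlmostEquivalent checkAlmostEquivalent_alt
  set s1 := PySem.List.sorted word1.toList (fun x => x) false with hs1
  set s2 := PySem.List.sorted word2.toList (fun x => x) false with hs2
  have hp1 : s1.Pairwise (· ≤ ·) := PySem.List.sorted_pairwise word1.toList (fun x => x)
  have hp2 : s2.Pairwise (· ≤ ·) := PySem.List.sorted_pairwise word2.toList (fun x => x)
  have hcnt1 : ∀ ch, s1.count ch = word1.toList.count ch :=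
    fun ch => (PySem.List.sorted_perm word1.toList (fun x => x) false).count_eq ch
  have hcnt2 : ∀ ch, s2.count ch = word2.toList.count ch :=
    fun ch => (PySem.List.sorted_perm word2.toList (fun x => x) false).count_eq ch
  rw [Bool.eq_iff_iff, caeA_iff,
      caeRuns_iff (s1.length + s2.length) s1 s2 (le_refl _) hp1 hp2]
  constructor
  · intro hall ch; rw [hcnt1 ch, hcnt2 ch]; exact hall ch
  · intro hall ch; rw [← hcnt1 ch, ← hcnt2 ch]; exact hall ch
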